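-- pv_equiv track=rewrite | github.com/alex-code4okc/advent-of-code2020 | Day7/day7.py | recursive_descent
-- ===== SOURCE A (Python) =====
-- def recursive_descent(d: dict, collector: set, start_key: str) -> set:
--     if d.get(start_key):
--         for key in d.get(start_key):
--             collector.add(key)
--             recursive_descent(d, collector, key)
--         return collector
--     else:
--         return collector
-- ===== SOURCE B (Python) =====
-- def recursive_descent(d: dict, collector: set, start_key: str) -> set:
--     stack = list(d.get(start_key) or ())
--     stack.reverse()
--     done = {start_key}
--     while stack:
--         k = stack.pop()
--         if k in done:
--             continue
--         done.add(k)
--         collector.add(k)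
--         stack.extend(reversed(d.get(k) or ()))
--     return collector
-- ===== Notes on version B (the rewrite author's own statement) =====
-- stated objective: alternative
-- what changed: A is a naive recursion that re-expands a key every time it is reached; B is an iterative explicit-stack DFS with a visited set that expands each key at most once (and, unlike A, terminates on cyclic graphs).
import Mathlib
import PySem

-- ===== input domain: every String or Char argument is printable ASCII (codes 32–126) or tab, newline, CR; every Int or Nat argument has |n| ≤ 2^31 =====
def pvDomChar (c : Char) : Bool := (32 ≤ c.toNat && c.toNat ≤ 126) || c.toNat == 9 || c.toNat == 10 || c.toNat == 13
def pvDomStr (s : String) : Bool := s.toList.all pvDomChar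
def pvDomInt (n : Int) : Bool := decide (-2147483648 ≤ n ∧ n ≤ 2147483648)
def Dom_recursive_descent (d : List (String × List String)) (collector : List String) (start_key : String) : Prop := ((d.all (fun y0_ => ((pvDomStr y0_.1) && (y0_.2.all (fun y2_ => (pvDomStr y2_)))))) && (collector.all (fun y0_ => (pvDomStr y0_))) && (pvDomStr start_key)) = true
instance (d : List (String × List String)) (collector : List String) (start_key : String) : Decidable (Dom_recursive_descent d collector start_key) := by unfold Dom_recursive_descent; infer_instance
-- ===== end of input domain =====

-- B replaces A's naive recursion (which re-expands a key every time it is reached) by an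
-- iterative explicit-stack DFS with a visited set that expands each key at most once;
-- return value only — both Pythons mutate `collector` in place identically (they add
-- exactly the returned elements).

-- d.get(k): neighbours of k, [] when the key is absent or maps to the empty list
-- (A's `if d.get(start_key):` truthiness = iterating over []).  Shared by both ports.
def pvNbrs (d : List (String × List String)) (k : String) : List String :=
  match PySem.Dict.get? (PySem.Dict.mk d) k with
  | some l => l
  | none => []

-- ===== PORT A =====
-- A's recursion, fuel = recursion depth; fuel d.length+1 is never exhausted on Pre_ inputs
-- (on a cyclic input Python A raises RecursionError — excluded by Pre_).
def pvGoA (d : List (String × List String)) : Nat → List String → String → List String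
  | 0, c, _ => c
  | n+1, c, k => (pvNbrs d k).foldl (fun c key => pvGoA d n (PySem.Set.add c key) key) c

def recursive_descent (d : List (String × List String)) (collector : List String) (start_key : String) : List String :=
  pvGoA d (d.length + 1) collector start_key

-- ===== PORT B =====
-- B's while-loop over an explicit stack (head of the list = top of the stack, so Python's
-- `stack.extend(reversed(nbrs)); stack.pop()` is `nbrs ++ rest`); the fuel only makes the
-- loop total in Lean (each iteration pops one entry; entries pushed ≤ total edges, so
-- 2·edges+1 iterations are never exhausted — proved below).
def pvGoS (d : List (String × List String)) : Nat → List String → PySem.Set String → List String → List String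
  | 0, c, _, _ => c
  | _+1, c, _, [] => c
  | n+1, c, done, k :: rest =>
      if k ∈ done then pvGoS d n c done rest
      else pvGoS d n (PySem.Set.add c k) (PySem.Set.add done k) (pvNbrs d k ++ rest)

def recursive_descent_alt (d : List (String × List String)) (collector : List String) (start_key : String) : List String :=
  pvGoS d ((d.flatMap (fun p => p.2)).length + (d.flatMap (fun p => p.2)).length + 1)
    collector (PySem.Set.add PySem.Set.empty start_key) (pvNbrs d start_key)

-- ===== PRECONDITION & SPEC =====
-- pvRC d k: the set of nodes reachable from k by ≥ 1 edge, computed as a fixpoint iteration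
-- of "add all neighbours" (iterated more times than there are candidate nodes).
def pvStep (d : List (String × List String)) (s : List String) : List String :=
  s.foldl (fun acc x => (pvNbrs d x).foldl PySem.Set.add acc) s

def pvRC (d : List (String × List String)) (k : String) : List String :=
  (pvStep d)^[(d.flatMap (fun p => p.2)).length] (PySem.Set.ofList (pvNbrs d k))

-- Pre_: no node on a cycle is reachable from start_key (including start_key itself).
-- Exactly there Python A recurses forever (RecursionError); on every other input A returns.
def Pre_recursive_descent (d : List (String × List String)) (collector : List String) (start_key : String) : Prop :=
  ∀ y ∈ (start_key :: pvRC d start_key), y ∉ pvRC d y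

instance (d : List (String × List String)) (collector : List String) (start_key : String) : Decidable (Pre_recursive_descent d collector start_key) := by unfold Pre_recursive_descent; infer_instance

def pvWitness_recursive_descent : (List (String × List String)) × List String × String :=
  ([("a", ["b", "c"]), ("b", ["c"])], ["x"], "a")

def Spec_recursive_descent (d : List (String × List String)) (collector : List String) (start_key : String) (out : List String) : Prop := out = recursive_descent_alt d collector start_key
instance (d : List (String × List String)) (collector : List String) (start_key : String) (out : List String) : Decidable (Spec_recursive_descent d collector start_key out) := by unfold Spec_recursive_descent; infer_instance

-- ===== CLAIM (what is proved, stated in full; the proofs are below) =====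
def Claim_equal_recursive_descent : Prop := ∀ (d : List (String × List String)) (collector : List String) (start_key : String), Dom_recursive_descent d collector start_key → Pre_recursive_descent d collector start_key → Spec_recursive_descent d collector start_key (recursive_descent d collector start_key)

-- ===== LEMMAS AND PROOFS =====

-- proof-only reference function: memoised DFS in A's recursive shape (parent adds the key,
-- the callee checks the visited set).  A is proved equal to it (pvMain), and B's stack loop
-- is proved equal to a fold of it (pvBR).
def pvGoM (d : List (String × List String)) : Nat → List String → PySem.Set String → String → List String × PySem.Set String
  | 0, c, done, _ => (c, done)
  | n+1, c, done, k =>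
      if k ∈ done then (c, done)
      else (pvNbrs d k).foldl
        (fun p key => pvGoM d n (PySem.Set.add p.1 key) p.2 key)
        (c, PySem.Set.add done k)

-- membership in a fold of Set.add
theorem pv_mem_foldl_add {l acc : List String} {y : String} :
    y ∈ l.foldl PySem.Set.add acc ↔ y ∈ acc ∨ y ∈ l := by
  induction l generalizing acc with
  | nil => simp
  | cons x xs ih => simp [List.foldl, ih, PySem.Set.mem_add]; tauto

theorem pv_mem_foldl_nbrs (d : List (String × List String)) (l : List String) (acc : List String) (y : String) :
    y ∈ l.foldl (fun acc x => (pvNbrs d x).foldl PySem.Set.add acc) acc ↔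
      y ∈ acc ∨ ∃ x ∈ l, y ∈ pvNbrs d x := by
  induction l generalizing acc with
  | nil => simp
  | cons x xs ih => simp [List.foldl, ih, pv_mem_foldl_add]; tauto

theorem pv_mem_step {d : List (String × List String)} {s : List String} {y : String} :
    y ∈ pvStep d s ↔ y ∈ s ∨ ∃ x ∈ s, y ∈ pvNbrs d x := by
  simpa [pvStep] using pv_mem_foldl_nbrs d s s y

theorem pv_nbrs_subset_flat {d : List (String × List String)} {x y : String}
    (h : y ∈ pvNbrs d x) : y ∈ d.flatMap (fun p => p.2) := by
  unfold pvNbrs at h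
  induction d with
  | nil => simp [PySem.Dict.get?] at h
  | cons p rest ih =>
      rw [PySem.Dict.get?_mk_cons] at h
      by_cases he : p.1 == x
      · simp [he] at h
        exact List.mem_flatMap.2 ⟨p, List.mem_cons_self, h⟩
      · simp [he] at h
        have := ih h
        simp [List.flatMap] at this ⊢
        tauto

-- every element of the closure iteration is a value of d; the iterates are Nodup
theorem pv_nodup_foldl_add {l acc : List String} (h : acc.Nodup) :
    (l.foldl PySem.Set.add acc).Nodup := by
  induction l generalizing acc with
  | nil => exact h
  | cons x xs ih => exact ih (PySem.Set.nodup_add acc x h)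

theorem pv_nodup_foldl_nbrs (d : List (String × List String)) (l : List String) :
    ∀ acc : List String, acc.Nodup →
      (l.foldl (fun acc x => (pvNbrs d x).foldl PySem.Set.add acc) acc).Nodup := by
  induction l with
  | nil => intro acc h; exact h
  | cons x xs ih => intro acc h; exact ih ((pvNbrs d x).foldl PySem.Set.add acc) (pv_nodup_foldl_add h)

theorem pv_nodup_step {d : List (String × List String)} {s : List String} (h : s.Nodup) :
    (pvStep d s).Nodup :=
  pv_nodup_foldl_nbrs d s s h

theorem pv_nodup_it (d : List (String × List String)) (k : String) (n : Nat) :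
    ((pvStep d)^[n] (PySem.Set.ofList (pvNbrs d k))).Nodup := by
  induction n with
  | zero => exact PySem.Set.nodup_ofList (pvNbrs d k)
  | succ n ih => rw [Function.iterate_succ_apply']; exact pv_nodup_step ih

theorem pv_it_subset_flat (d : List (String × List String)) (k : String) (n : Nat) :
    ∀ y ∈ (pvStep d)^[n] (PySem.Set.ofList (pvNbrs d k)), y ∈ d.flatMap (fun p => p.2) := by
  induction n with
  | zero =>
      intro y hy
      exact pv_nbrs_subset_flat ((PySem.Set.mem_ofList _ _).1 hy)
  | succ n ih =>
      intro y hy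
      rw [Function.iterate_succ_apply'] at hy
      rcases pv_mem_step.1 hy with h | ⟨x, hx, hxy⟩
      · exact ih y h
      · exact pv_nbrs_subset_flat hxy

theorem pv_it_mono (d : List (String × List String)) (k : String) {m n : Nat} (h : m ≤ n) :
    ∀ y ∈ (pvStep d)^[m] (PySem.Set.ofList (pvNbrs d k)), y ∈ (pvStep d)^[n] (PySem.Set.ofList (pvNbrs d k)) := by
  induction n with
  | zero => intro y hy; rcases Nat.le_zero.1 h; exact hy
  | succ n ih =>
      intro y hy
      rcases Nat.lt_or_ge m (n+1) with hlt | hge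
      · rw [Function.iterate_succ_apply']
        exact pv_mem_step.2 (Or.inl (ih (Nat.lt_succ_iff.1 hlt) y hy))
      · rcases Nat.le_antisymm h hge; exact hy

-- a fixpoint is reached within (d.flatMap (·.2)).length iterations and persists
theorem pv_it_len (d : List (String × List String)) (k : String) (n : Nat) :
    ((pvStep d)^[n] (PySem.Set.ofList (pvNbrs d k))).length ≤ (d.flatMap (fun p => p.2)).length := by
  have hnd := pv_nodup_it d k n
  calc ((pvStep d)^[n] (PySem.Set.ofList (pvNbrs d k))).length
      = ((pvStep d)^[n] (PySem.Set.ofList (pvNbrs d k))).toFinset.card := (List.toFinset_card_of_nodup hnd).symm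
    _ ≤ (d.flatMap (fun p => p.2)).toFinset.card := by
        apply Finset.card_le_card
        intro y hy
        exact List.mem_toFinset.2 (pv_it_subset_flat d k n y (List.mem_toFinset.1 hy))
    _ ≤ (d.flatMap (fun p => p.2)).length := List.toFinset_card_le _

theorem pv_growth (d : List (String × List String)) (k : String) :
    ∀ j : Nat,
      (∀ m < j, ¬ (∀ y ∈ pvStep d ((pvStep d)^[m] (PySem.Set.ofList (pvNbrs d k))),
          y ∈ (pvStep d)^[m] (PySem.Set.ofList (pvNbrs d k)))) →
      j ≤ ((pvStep d)^[j] (PySem.Set.ofList (pvNbrs d k))).length := by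
  intro j
  induction j with
  | zero => intro _; exact Nat.zero_le _
  | succ j ih =>
      intro h
      have hj : j ≤ ((pvStep d)^[j] (PySem.Set.ofList (pvNbrs d k))).length :=
        ih (fun m hm => h m (Nat.lt_succ_of_lt hm))
      have hnf := h j (Nat.lt_succ_self j)
      push_neg at hnf
      obtain ⟨y, hy1, hy2⟩ := hnf
      have hsub : ((pvStep d)^[j] (PySem.Set.ofList (pvNbrs d k))).toFinset ⊂
          ((pvStep d)^[j+1] (PySem.Set.ofList (pvNbrs d k))).toFinset := by
        constructor
        · intro z hz
          rw [Function.iterate_succ_apply']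
          exact List.mem_toFinset.2 (pv_mem_step.2 (Or.inl (List.mem_toFinset.1 hz)))
        · intro hcon
          apply hy2
          apply List.mem_toFinset.1
          apply hcon
          rw [Function.iterate_succ_apply'] at *
          exact List.mem_toFinset.2 hy1
      have hcard := Finset.card_lt_card hsub
      rw [List.toFinset_card_of_nodup (pv_nodup_it d k j),
          List.toFinset_card_of_nodup (pv_nodup_it d k (j+1))] at hcard
      omega

theorem pv_exists_fix (d : List (String × List String)) (k : String) :
    ∃ m ≤ (d.flatMap (fun p => p.2)).length,
      ∀ y ∈ pvStep d ((pvStep d)^[m] (PySem.Set.ofList (pvNbrs d k))),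
        y ∈ (pvStep d)^[m] (PySem.Set.ofList (pvNbrs d k)) := by
  by_contra hcon
  push_neg at hcon
  have h := pv_growth d k ((d.flatMap (fun p => p.2)).length + 1) (by
    intro m hm
    intro hfix
    obtain ⟨y, hy1, hy2⟩ := hcon m (Nat.lt_succ_iff.1 hm)
    exact hy2 (hfix y hy1))
  have := pv_it_len d k ((d.flatMap (fun p => p.2)).length + 1)
  omega

theorem pv_persist (d : List (String × List String)) (k : String) (m : Nat)
    (hfix : ∀ y ∈ pvStep d ((pvStep d)^[m] (PySem.Set.ofList (pvNbrs d k))),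
        y ∈ (pvStep d)^[m] (PySem.Set.ofList (pvNbrs d k))) :
    ∀ i : Nat, ∀ y ∈ (pvStep d)^[m + i] (PySem.Set.ofList (pvNbrs d k)),
      y ∈ (pvStep d)^[m] (PySem.Set.ofList (pvNbrs d k)) := by
  intro i
  induction i with
  | zero => intro y hy; exact hy
  | succ i ih =>
      intro y hy
      rw [show m + (i+1) = (m + i) + 1 by omega, Function.iterate_succ_apply'] at hy
      rcases pv_mem_step.1 hy with h | ⟨x, hx, hxy⟩
      · exact ih y h
      · exact hfix y (pv_mem_step.2 (Or.inr ⟨x, ih x hx, hxy⟩))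

theorem pv_RC_closed {d : List (String × List String)} {k y z : String}
    (hy : y ∈ pvRC d k) (hz : z ∈ pvNbrs d y) : z ∈ pvRC d k := by
  obtain ⟨m, hm, hfix⟩ := pv_exists_fix d k
  unfold pvRC at hy ⊢
  have hym : y ∈ (pvStep d)^[m] (PySem.Set.ofList (pvNbrs d k)) := by
    have := pv_persist d k m hfix ((d.flatMap (fun p => p.2)).length - m)
    rw [show m + ((d.flatMap (fun p => p.2)).length - m) = (d.flatMap (fun p => p.2)).length by omega] at this
    exact this y hy
  have hzm : z ∈ (pvStep d)^[m] (PySem.Set.ofList (pvNbrs d k)) :=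
    hfix z (pv_mem_step.2 (Or.inr ⟨y, hym, hz⟩))
  exact pv_it_mono d k hm z hzm

theorem pv_RC_seed {d : List (String × List String)} {k y : String}
    (h : y ∈ pvNbrs d k) : y ∈ pvRC d k := by
  unfold pvRC
  exact pv_it_mono d k (Nat.zero_le _) y ((PySem.Set.mem_ofList _ _).2 h)

theorem pv_RC_trans {d : List (String × List String)} {k y z : String}
    (hy : y ∈ pvRC d k) (hz : z ∈ pvRC d y) : z ∈ pvRC d k := by
  have aux : ∀ n : Nat, ∀ w ∈ (pvStep d)^[n] (PySem.Set.ofList (pvNbrs d y)), w ∈ pvRC d k := by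
    intro n
    induction n with
    | zero => intro w hw; exact pv_RC_closed hy ((PySem.Set.mem_ofList _ _).1 hw)
    | succ n ih =>
        intro w hw
        rw [Function.iterate_succ_apply'] at hw
        rcases pv_mem_step.1 hw with h | ⟨x, hx, hxw⟩
        · exact ih w h
        · exact pv_RC_closed (ih x hx) hxw
  exact aux _ z hz

theorem pv_RC_decomp {d : List (String × List String)} {k y : String}
    (h : y ∈ pvRC d k) : y ∈ pvNbrs d k ∨ ∃ x ∈ pvNbrs d k, y ∈ pvRC d x := by
  have aux : ∀ n : Nat, ∀ w ∈ (pvStep d)^[n] (PySem.Set.ofList (pvNbrs d k)),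
      w ∈ pvNbrs d k ∨ ∃ x ∈ pvNbrs d k, w ∈ pvRC d x := by
    intro n
    induction n with
    | zero => intro w hw; exact Or.inl ((PySem.Set.mem_ofList _ _).1 hw)
    | succ n ih =>
        intro w hw
        rw [Function.iterate_succ_apply'] at hw
        rcases pv_mem_step.1 hw with h1 | ⟨x, hx, hxw⟩
        · exact ih w h1
        · rcases ih x hx with h2 | ⟨x2, hx2, hx2m⟩
          · exact Or.inr ⟨x, h2, pv_RC_seed hxw⟩
          · exact Or.inr ⟨x2, hx2, pv_RC_closed hx2m hxw⟩
  exact aux _ y h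

-- A's expansion adds nothing once the closure of k is already collected
theorem pv_goA_stable (d : List (String × List String)) :
    ∀ (n : Nat) (c : List String) (k : String),
      (∀ y ∈ pvRC d k, y ∈ c) → pvGoA d n c k = c := by
  intro n
  induction n with
  | zero => intro c k _; rfl
  | succ n ih =>
      intro c k hc
      show (pvNbrs d k).foldl (fun c key => pvGoA d n (PySem.Set.add c key) key) c = c
      have aux : ∀ l : List String,
          (∀ key ∈ l, key ∈ c ∧ (∀ y ∈ pvRC d key, y ∈ c)) →
          l.foldl (fun c key => pvGoA d n (PySem.Set.add c key) key) c = c := by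
        intro l
        induction l with
        | nil => intro _; rfl
        | cons key rest ihl =>
            intro hl
            obtain ⟨hkc, hkr⟩ := hl key List.mem_cons_self
            have h1 : PySem.Set.add c key = c := PySem.Set.add_of_mem hkc
            have h2 : pvGoA d n (PySem.Set.add c key) key = c := by
              rw [h1]; exact ih c key hkr
            simp only [List.foldl, h2]
            exact ihl (fun x hx => hl x (List.mem_cons_of_mem _ hx))
      apply aux
      intro key hkey
      have hkRC : key ∈ pvRC d k := pv_RC_seed hkey
      exact ⟨hc key hkRC, fun y hy => hc y (pv_RC_trans hkRC hy)⟩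

-- nodes with no neighbours have empty closure
theorem pv_RC_nil {d : List (String × List String)} {k : String}
    (h : pvNbrs d k = []) : pvRC d k = [] := by
  unfold pvRC
  rw [h]
  have : ∀ n : Nat, (pvStep d)^[n] (PySem.Set.ofList ([] : List String)) = [] := by
    intro n
    induction n with
    | zero => rfl
    | succ n ih => rw [Function.iterate_succ_apply', ih]; rfl
  exact this _

def pvKeys (d : List (String × List String)) : List String := d.map Prod.fst

theorem pv_key_of_nbrs {d : List (String × List String)} {k : String}
    (h : pvNbrs d k ≠ []) : k ∈ pvKeys d := by
  unfold pvNbrs at h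
  cases hg : PySem.Dict.get? (PySem.Dict.mk d) k with
  | none => rw [hg] at h; exact absurd rfl h
  | some l =>
      by_contra hnk
      have h2 : PySem.Dict.get? (PySem.Dict.mk d) k = none :=
        (PySem.Dict.get?_eq_none_iff_not_mem_keys _ _).2 hnk
      rw [hg] at h2
      exact Option.some_ne_none l h2

-- fuel measure: keys of d inside the closure of k not yet marked done
def pvMu (d : List (String × List String)) (k : String) (done : List String) : Nat :=
  ((pvKeys d).toFinset.filter (fun x => (x = k ∨ x ∈ pvRC d k) ∧ x ∉ done)).card

theorem pv_mu_lt {d : List (String × List String)} {k key : String} {done done₁ : List String}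
    (hkK : k ∈ pvKeys d) (hkey : key ∈ pvRC d k) (hknd : k ∉ done) (hkd1 : k ∈ done₁)
    (hsub : ∀ x ∈ done, x ∈ done₁) :
    pvMu d key done₁ < pvMu d k done := by
  apply Finset.card_lt_card
  constructor
  · intro x hx
    rw [Finset.mem_filter] at hx ⊢
    obtain ⟨hxK, hxk, hxd⟩ := hx
    refine ⟨hxK, ?_, fun hc => hxd (hsub x hc)⟩
    rcases hxk with rfl | hxr
    · exact Or.inr hkey
    · exact Or.inr (pv_RC_trans hkey hxr)
  · intro hcon
    have hk1 : k ∈ (pvKeys d).toFinset.filter (fun x => (x = k ∨ x ∈ pvRC d k) ∧ x ∉ done) := by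
      rw [Finset.mem_filter]
      exact ⟨List.mem_toFinset.2 hkK, Or.inl rfl, hknd⟩
    have := hcon hk1
    rw [Finset.mem_filter] at this
    exact this.2.2 hkd1

-- the simulation: A's naive recursion equals the memoised DFS (same fuel), with the
-- invariants: every done node is either in progress (gray or k) or fully collected.
theorem pvMain (d : List (String × List String)) :
    ∀ (n : Nat) (c done gray : List String) (k : String),
      (∀ x ∈ done, x ∈ gray ∨ ∀ y ∈ pvRC d x, y ∈ c) →
      (∀ x ∈ gray, x ≠ k ∧ x ∉ pvRC d k) →
      (∀ y, (y = k ∨ y ∈ pvRC d k) → y ∉ pvRC d y) →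
      pvMu d k done < n →
      pvGoA d n c k = (pvGoM d n c done k).1
      ∧ (∀ x ∈ (pvGoM d n c done k).2, x ∈ done ∨ x = k ∨ x ∈ pvRC d k)
      ∧ (∀ x ∈ c, x ∈ (pvGoM d n c done k).1)
      ∧ (∀ x ∈ done, x ∈ (pvGoM d n c done k).2)
      ∧ k ∈ (pvGoM d n c done k).2
      ∧ (∀ x ∈ (pvGoM d n c done k).2, x ∈ gray ∨ ∀ y ∈ pvRC d x, y ∈ (pvGoM d n c done k).1) := by
  intro n
  induction n with
  | zero => intro c done gray k _ _ _ hfuel; omega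
  | succ n ih =>
      intro c done gray k H1 H2 H3 Hfuel
      by_cases hk : k ∈ done
      · have hB : pvGoM d (n+1) c done k = (c, done) := by
          show (if k ∈ done then (c, done) else _) = (c, done)
          rw [if_pos hk]
        have hkg : k ∉ gray := fun hg => (H2 k hg).1 rfl
        have hcoll : ∀ y ∈ pvRC d k, y ∈ c := by
          rcases H1 k hk with hg | h
          · exact absurd hg hkg
          · exact h
        rw [hB]
        exact ⟨pv_goA_stable d (n+1) c k hcoll, fun x hx => Or.inl hx, fun x hx => hx,
          fun x hx => hx, hk, H1⟩
      · have hB : pvGoM d (n+1) c done k =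
            (pvNbrs d k).foldl (fun p key => pvGoM d n (PySem.Set.add p.1 key) p.2 key)
              (c, PySem.Set.add done k) := by
          show (if k ∈ done then (c, done) else _) = _
          rw [if_neg hk]
        have hA : pvGoA d (n+1) c k =
            (pvNbrs d k).foldl (fun c key => pvGoA d n (PySem.Set.add c key) key) c := rfl
        by_cases hnb : pvNbrs d k = []
        · have hRCk : pvRC d k = [] := pv_RC_nil hnb
          rw [hB, hA, hnb]
          simp only [List.foldl_nil]
          refine ⟨trivial, ?_, fun x hx => hx, ?_, ?_, ?_⟩
          · intro x hx
            rcases (PySem.Set.mem_add done k x).1 hx with h | rfl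
            · exact Or.inl h
            · exact Or.inr (Or.inl rfl)
          · exact fun x hx => (PySem.Set.mem_add done k x).2 (Or.inl hx)
          · exact (PySem.Set.mem_add done k k).2 (Or.inr rfl)
          · intro x hx
            rcases (PySem.Set.mem_add done k x).1 hx with h | rfl
            · rcases H1 x h with hg | hc
              · exact Or.inl hg
              · exact Or.inr (fun y hy => hc y hy)
            · exact Or.inr (fun y hy => absurd (hRCk ▸ hy) (List.not_mem_nil))
        · have hkK : k ∈ pvKeys d := pv_key_of_nbrs hnb
          have hkRCk : k ∉ pvRC d k := H3 k (Or.inl rfl)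
          have hfold : ∀ (l : List String), (∀ key ∈ l, key ∈ pvRC d k) →
              ∀ (c₁ done₁ : List String),
              (∀ x ∈ done₁, x ∈ k :: gray ∨ ∀ y ∈ pvRC d x, y ∈ c₁) →
              (∀ x ∈ done₁, x ∈ done ∨ x = k ∨ x ∈ pvRC d k) →
              (∀ x ∈ done, x ∈ done₁) → k ∈ done₁ →
              (l.foldl (fun c key => pvGoA d n (PySem.Set.add c key) key) c₁ =
                (l.foldl (fun p key => pvGoM d n (PySem.Set.add p.1 key) p.2 key) (c₁, done₁)).1)
              ∧ (∀ x ∈ (l.foldl (fun p key => pvGoM d n (PySem.Set.add p.1 key) p.2 key) (c₁, done₁)).2,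
                    x ∈ done ∨ x = k ∨ x ∈ pvRC d k)
              ∧ (∀ x ∈ (l.foldl (fun p key => pvGoM d n (PySem.Set.add p.1 key) p.2 key) (c₁, done₁)).2,
                    x ∈ k :: gray ∨ ∀ y ∈ pvRC d x, y ∈ (l.foldl (fun p key => pvGoM d n (PySem.Set.add p.1 key) p.2 key) (c₁, done₁)).1)
              ∧ (∀ x ∈ c₁, x ∈ (l.foldl (fun p key => pvGoM d n (PySem.Set.add p.1 key) p.2 key) (c₁, done₁)).1)
              ∧ (∀ x ∈ done₁, x ∈ (l.foldl (fun p key => pvGoM d n (PySem.Set.add p.1 key) p.2 key) (c₁, done₁)).2)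
              ∧ (∀ key ∈ l, key ∈ (l.foldl (fun p key => pvGoM d n (PySem.Set.add p.1 key) p.2 key) (c₁, done₁)).1
                    ∧ key ∈ (l.foldl (fun p key => pvGoM d n (PySem.Set.add p.1 key) p.2 key) (c₁, done₁)).2) := by
            intro l
            induction l with
            | nil =>
                intro _ c₁ done₁ J1 J2 J3 J3k
                simp only [List.foldl_nil]
                exact ⟨trivial, J2, J1, fun x hx => hx, fun x hx => hx,
                  fun key hkey => absurd hkey List.not_mem_nil⟩
            | cons key rest ihl =>
                intro Hl c₁ done₁ J1 J2 J3 J3k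
                have hkeyRC : key ∈ pvRC d k := Hl key List.mem_cons_self
                have hkne : k ≠ key := by
                  rintro rfl
                  exact hkRCk hkeyRC
                have hknRCkey : k ∉ pvRC d key := fun hc => hkRCk (pv_RC_trans hkeyRC hc)
                have H1' : ∀ x ∈ done₁, x ∈ k :: gray ∨ ∀ y ∈ pvRC d x, y ∈ PySem.Set.add c₁ key := by
                  intro x hx
                  rcases J1 x hx with hg | hc
                  · exact Or.inl hg
                  · exact Or.inr (fun y hy => (PySem.Set.mem_add c₁ key y).2 (Or.inl (hc y hy)))
                have H2' : ∀ x ∈ k :: gray, x ≠ key ∧ x ∉ pvRC d key := by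
                  intro x hx
                  rcases List.mem_cons.1 hx with rfl | hg
                  · exact ⟨hkne, hknRCkey⟩
                  · obtain ⟨-, hxr⟩ := H2 x hg
                    constructor
                    · rintro rfl; exact hxr hkeyRC
                    · exact fun hc => hxr (pv_RC_trans hkeyRC hc)
                have H3' : ∀ y, (y = key ∨ y ∈ pvRC d key) → y ∉ pvRC d y := by
                  intro y hy
                  rcases hy with rfl | hyr
                  · exact H3 y (Or.inr hkeyRC)
                  · exact H3 y (Or.inr (pv_RC_trans hkeyRC hyr))
                have Hfuel' : pvMu d key done₁ < n := by
                  have h1 : pvMu d key done₁ < pvMu d k done :=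
                    pv_mu_lt hkK hkeyRC hk J3k J3
                  omega
                obtain ⟨S1, S2, S3, S4, S5, S6⟩ :=
                  ih (PySem.Set.add c₁ key) done₁ (k :: gray) key H1' H2' H3' Hfuel'
                obtain ⟨G1, G2, G3, G7, G8, G9⟩ :=
                  ihl (fun x hx => Hl x (List.mem_cons_of_mem _ hx))
                    (pvGoM d n (PySem.Set.add c₁ key) done₁ key).1
                    (pvGoM d n (PySem.Set.add c₁ key) done₁ key).2
                    S6
                    (by
                      intro x hx
                      rcases S2 x hx with hd | rfl | hr
                      · exact J2 x hd
                      · exact Or.inr (Or.inr hkeyRC)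
                      · exact Or.inr (Or.inr (pv_RC_trans hkeyRC hr)))
                    (fun x hx => S4 x (J3 x hx))
                    (S4 k J3k)
                simp only [List.foldl_cons]
                rw [S1]
                refine ⟨G1, G2, G3, ?_, fun x hx => G8 x (S4 x hx), ?_⟩
                · intro x hx
                  exact G7 x (S3 x ((PySem.Set.mem_add c₁ key x).2 (Or.inl hx)))
                · intro key2 hkey2
                  rcases List.mem_cons.1 hkey2 with rfl | hr
                  · exact ⟨G7 _ (S3 _ ((PySem.Set.mem_add c₁ key2 key2).2 (Or.inr rfl))), G8 _ S5⟩
                  · exact G9 key2 hr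
          have J1i : ∀ x ∈ PySem.Set.add done k, x ∈ k :: gray ∨ ∀ y ∈ pvRC d x, y ∈ c := by
            intro x hx
            rcases (PySem.Set.mem_add done k x).1 hx with h | rfl
            · rcases H1 x h with hg | hc
              · exact Or.inl (List.mem_cons_of_mem _ hg)
              · exact Or.inr hc
            · exact Or.inl List.mem_cons_self
          have J2i : ∀ x ∈ PySem.Set.add done k, x ∈ done ∨ x = k ∨ x ∈ pvRC d k := by
            intro x hx
            rcases (PySem.Set.mem_add done k x).1 hx with h | rfl
            · exact Or.inl h
            · exact Or.inr (Or.inl rfl)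
          obtain ⟨G1, G2, G3, G7, G8, G9⟩ :=
            hfold (pvNbrs d k) (fun key hkey => pv_RC_seed hkey) c (PySem.Set.add done k)
              J1i J2i (fun x hx => (PySem.Set.mem_add done k x).2 (Or.inl hx))
              ((PySem.Set.mem_add done k k).2 (Or.inr rfl))
          rw [hB, hA]
          refine ⟨G1, G2, G7, ?_, ?_, ?_⟩
          · exact fun x hx => G8 x ((PySem.Set.mem_add done k x).2 (Or.inl hx))
          · exact G8 k ((PySem.Set.mem_add done k k).2 (Or.inr rfl))
          · intro x hx
            rcases G3 x hx with hg | hc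
            · rcases List.mem_cons.1 hg with hxe | hgg
              · rw [hxe]
                refine Or.inr ?_
                intro y hy
                rcases pv_RC_decomp hy with hn | ⟨x2, hx2n, hyr⟩
                · exact (G9 y hn).1
                · have hx2df := (G9 x2 hx2n).2
                  have hx2RC : x2 ∈ pvRC d k := pv_RC_seed hx2n
                  rcases G3 x2 hx2df with hg2 | hc2
                  · rcases List.mem_cons.1 hg2 with hx2e | hgg2
                    · exact absurd (by rw [hx2e] at hx2RC; exact hx2RC) hkRCk
                    · exact absurd hx2RC (H2 x2 hgg2).2
                  · exact hc2 y hyr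
              · exact Or.inl hgg
            · exact Or.inr hc

-- done only grows through the memoised DFS
theorem pvGoM_done_mono (d : List (String × List String)) :
    ∀ (n : Nat) (c done : List String) (k x : String), x ∈ done → x ∈ (pvGoM d n c done k).2 := by
  intro n
  induction n with
  | zero => intro c done k x hx; exact hx
  | succ n ih =>
      intro c done k x hx
      by_cases hk : k ∈ done
      · have h : pvGoM d (n+1) c done k = (c, done) := by
          show (if k ∈ done then (c, done) else _) = (c, done)
          rw [if_pos hk]
        rw [h]; exact hx
      · have hB : pvGoM d (n+1) c done k =
            (pvNbrs d k).foldl (fun p key => pvGoM d n (PySem.Set.add p.1 key) p.2 key)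
              (c, PySem.Set.add done k) := by
          show (if k ∈ done then (c, done) else _) = _
          rw [if_neg hk]
        rw [hB]
        have aux : ∀ (l : List String) (p : List String × PySem.Set String), x ∈ p.2 →
            x ∈ (l.foldl (fun p key => pvGoM d n (PySem.Set.add p.1 key) p.2 key) p).2 := by
          intro l
          induction l with
          | nil => intro p h; exact h
          | cons key rest ihl =>
              intro p h
              exact ihl _ (ih _ _ key x h)
        exact aux _ _ ((PySem.Set.mem_add done k x).2 (Or.inl hx))

-- two distinct done keys leave pvMu at least two below d.length
theorem pvMu_lt_of_two {d : List (String × List String)} {a b : String} {k : String} {done : List String}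
    (hab : a ≠ b) (ha : a ∈ pvKeys d) (hb : b ∈ pvKeys d) (had : a ∈ done) (hbd : b ∈ done) :
    pvMu d k done + 2 ≤ d.length := by
  have hsub : (pvKeys d).toFinset.filter (fun x => (x = k ∨ x ∈ pvRC d k) ∧ x ∉ done) ⊆
      (((pvKeys d).toFinset.erase a).erase b) := by
    intro x hx
    rw [Finset.mem_filter] at hx
    obtain ⟨hxK, -, hxd⟩ := hx
    have hxa : x ≠ a := fun e => hxd (e ▸ had)
    have hxb : x ≠ b := fun e => hxd (e ▸ hbd)
    exact Finset.mem_erase.2 ⟨hxb, Finset.mem_erase.2 ⟨hxa, hxK⟩⟩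
  have h1 : pvMu d k done ≤ (((pvKeys d).toFinset.erase a).erase b).card :=
    Finset.card_le_card hsub
  have hbe : b ∈ (pvKeys d).toFinset.erase a :=
    Finset.mem_erase.2 ⟨hab.symm, List.mem_toFinset.2 hb⟩
  have h2 : (((pvKeys d).toFinset.erase a).erase b).card = ((pvKeys d).toFinset.erase a).card - 1 :=
    Finset.card_erase_of_mem hbe
  have h3 : ((pvKeys d).toFinset.erase a).card = (pvKeys d).toFinset.card - 1 :=
    Finset.card_erase_of_mem (List.mem_toFinset.2 ha)
  have h4 : (pvKeys d).toFinset.card ≤ (pvKeys d).length := List.toFinset_card_le _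
  have h5 : (pvKeys d).length = d.length := List.length_map ..
  have h6 : 0 < ((pvKeys d).toFinset.erase a).card := Finset.card_pos.2 ⟨b, hbe⟩
  have h7 : 0 < (pvKeys d).toFinset.card := Finset.card_pos.2 ⟨a, List.mem_toFinset.2 ha⟩
  omega

-- the memoised DFS does not depend on the fuel once the fuel exceeds pvMu
theorem pvGoM_fuel (d : List (String × List String)) :
    ∀ (n m : Nat) (c done : List String) (k : String),
      pvMu d k done < n → pvMu d k done < m → pvGoM d n c done k = pvGoM d m c done k := by
  intro n
  induction n with
  | zero => intro m c done k h1 _; omega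
  | succ n ih =>
      intro m c done k h1 h2
      match m, h2 with
      | m+1, h2 =>
        by_cases hk : k ∈ done
        · show (if k ∈ done then (c, done) else _) = (if k ∈ done then (c, done) else _)
          rw [if_pos hk, if_pos hk]
        · show (if k ∈ done then (c, done) else _) = (if k ∈ done then (c, done) else _)
          rw [if_neg hk, if_neg hk]
          by_cases hnb : pvNbrs d k = []
          · rw [hnb]; rfl
          · have hkK : k ∈ pvKeys d := pv_key_of_nbrs hnb
            have aux : ∀ (l : List String), (∀ key ∈ l, key ∈ pvRC d k) →
                ∀ (p : List String × PySem.Set String),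
                (∀ x ∈ done, x ∈ p.2) → k ∈ p.2 →
                l.foldl (fun p key => pvGoM d n (PySem.Set.add p.1 key) p.2 key) p =
                l.foldl (fun p key => pvGoM d m (PySem.Set.add p.1 key) p.2 key) p := by
              intro l
              induction l with
              | nil => intro _ p _ _; rfl
              | cons key rest ihl =>
                  intro hl p hsub hkp
                  have hkey : key ∈ pvRC d k := hl key List.mem_cons_self
                  have hmu : pvMu d key p.2 < pvMu d k done := pv_mu_lt hkK hkey hk hkp hsub
                  have e1 : pvGoM d n (PySem.Set.add p.1 key) p.2 key =
                      pvGoM d m (PySem.Set.add p.1 key) p.2 key :=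
                    ih m (PySem.Set.add p.1 key) p.2 key (by omega) (by omega)
                  simp only [List.foldl_cons]
                  rw [e1]
                  exact ihl (fun x hx => hl x (List.mem_cons_of_mem _ hx))
                    (pvGoM d m (PySem.Set.add p.1 key) p.2 key)
                    (fun x hx => pvGoM_done_mono d m _ _ key x (hsub x hx))
                    (pvGoM_done_mono d m _ _ key k hkp)
            exact aux (pvNbrs d k) (fun key hkey => pv_RC_seed hkey) (c, PySem.Set.add done k)
              (fun x hx => (PySem.Set.mem_add done k x).2 (Or.inl hx))
              ((PySem.Set.mem_add done k k).2 (Or.inr rfl))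

-- pending work: total length of the neighbour lists of entries whose key is not yet done
def pvW (d : List (String × List String)) (done : List String) : Nat :=
  (d.map (fun p => if p.1 ∈ done then 0 else p.2.length)).sum

theorem pvW_mono {d : List (String × List String)} {done done2 : List String}
    (h : ∀ x ∈ done, x ∈ done2) : pvW d done2 ≤ pvW d done := by
  induction d with
  | nil => simp [pvW]
  | cons p rest ih =>
      simp only [pvW, List.map_cons, List.sum_cons] at *
      have hh : (if p.1 ∈ done2 then 0 else p.2.length) ≤ (if p.1 ∈ done then 0 else p.2.length) := by
        by_cases hp : p.1 ∈ done
        · simp [hp, h p.1 hp]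
        · split_ifs <;> omega
      omega

theorem pvW_le (d : List (String × List String)) (done : List String) :
    pvW d done ≤ (d.flatMap (fun p => p.2)).length := by
  induction d with
  | nil => simp [pvW]
  | cons p rest ih =>
      simp only [pvW, List.map_cons, List.sum_cons, List.flatMap_cons, List.length_append] at *
      split_ifs <;> omega

theorem pvW_add {d : List (String × List String)} {done : List String} {k : String}
    (hk : k ∉ done) : (pvNbrs d k).length + pvW d (PySem.Set.add done k) ≤ pvW d done := by
  induction d with
  | nil =>
      simp [pvW, pvNbrs, PySem.Dict.get?, PySem.Dict.mk]
  | cons p rest ih =>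
      have hnb : pvNbrs (p :: rest) k = if p.1 == k then p.2 else pvNbrs rest k := by
        unfold pvNbrs
        rw [PySem.Dict.get?_mk_cons]
        by_cases he : p.1 == k
        · simp [he]
        · simp [he]
      by_cases he : p.1 = k
      · have hpd : p.1 ∉ done := he ▸ hk
        have hpa : p.1 ∈ PySem.Set.add done k :=
          (PySem.Set.mem_add done k p.1).2 (Or.inr he)
        have hmono : pvW rest (PySem.Set.add done k) ≤ pvW rest done :=
          pvW_mono (fun x hx => (PySem.Set.mem_add done k x).2 (Or.inl hx))
        have hl : (pvNbrs (p :: rest) k).length ≤ p.2.length := by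
          rw [hnb]; simp [he]
        simp only [pvW, List.map_cons, List.sum_cons]
        rw [if_pos hpa, if_neg hpd]
        simp only [pvW] at hmono
        omega
      · have hnb2 : pvNbrs (p :: rest) k = pvNbrs rest k := by
          rw [hnb, if_neg (by simpa using he)]
        have hpe : (p.1 ∈ PySem.Set.add done k) ↔ (p.1 ∈ done) := by
          rw [PySem.Set.mem_add]
          constructor
          · rintro (h | h)
            · exact h
            · exact absurd h he
          · exact Or.inl
        simp only [pvW, List.map_cons, List.sum_cons]
        rw [hnb2]
        by_cases hpd : p.1 ∈ done
        · rw [if_pos (hpe.2 hpd), if_pos hpd]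
          simp only [pvW] at ih
          omega
        · rw [if_neg (fun h => hpd (hpe.1 h)), if_neg hpd]
          simp only [pvW] at ih
          omega

-- the bridge: B's stack loop equals a fold of the memoised DFS over the pending stack
theorem pvBR (d : List (String × List String)) (start : String)
    (hsk : start ∈ pvKeys d) (hsr : start ∉ pvRC d start) :
    ∀ (n : Nat) (s c done : List String),
      (∀ x ∈ done, x = start ∨ x ∈ c) →
      start ∈ done →
      (∀ k ∈ s, k ∈ pvRC d start) →
      s.length + pvW d done < n →
      pvGoS d n c done s =
        (s.foldl (fun p key => pvGoM d d.length (PySem.Set.add p.1 key) p.2 key) (c, done)).1 := by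
  obtain ⟨m, hm⟩ : ∃ m, d.length = m + 1 := by
    cases d with
    | nil => simp [pvKeys] at hsk
    | cons p rest => exact ⟨rest.length, by simp⟩
  intro n
  induction n with
  | zero => intro s c done _ _ _ hfuel; omega
  | succ n ih =>
      intro s c done H1 H2 H3 Hfuel
      cases s with
      | nil => rfl
      | cons k rest =>
          have hkRC : k ∈ pvRC d start := H3 k List.mem_cons_self
          have hkst : k ≠ start := fun e => hsr (e ▸ hkRC)
          by_cases hk : k ∈ done
          · have hkc : k ∈ c := (H1 k hk).resolve_left hkst
            have hLHS : pvGoS d (n+1) c done (k :: rest) = pvGoS d n c done rest := by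
              show (if k ∈ done then _ else _) = _
              rw [if_pos hk]
            have hstep : pvGoM d d.length (PySem.Set.add c k) done k = (c, done) := by
              rw [PySem.Set.add_of_mem hkc, hm]
              show (if k ∈ done then (c, done) else _) = (c, done)
              rw [if_pos hk]
            rw [hLHS]
            simp only [List.foldl_cons]
            rw [hstep]
            exact ih rest c done H1 H2 (fun x hx => H3 x (List.mem_cons_of_mem _ hx))
              (by simp only [List.length_cons] at Hfuel; omega)
          · have hLHS : pvGoS d (n+1) c done (k :: rest) =
                pvGoS d n (PySem.Set.add c k) (PySem.Set.add done k) (pvNbrs d k ++ rest) := by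
              show (if k ∈ done then _ else _) = _
              rw [if_neg hk]
            have hstep : pvGoM d d.length (PySem.Set.add c k) done k =
                (pvNbrs d k).foldl (fun p key => pvGoM d m (PySem.Set.add p.1 key) p.2 key)
                  (PySem.Set.add c k, PySem.Set.add done k) := by
              rw [hm]
              show (if k ∈ done then _ else _) = _
              rw [if_neg hk]
            have H1x : ∀ x ∈ PySem.Set.add done k, x = start ∨ x ∈ PySem.Set.add c k := by
              intro x hx
              rcases (PySem.Set.mem_add done k x).1 hx with h | he
              · rcases H1 x h with h2 | h2
                · exact Or.inl h2
                · exact Or.inr ((PySem.Set.mem_add c k x).2 (Or.inl h2))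
              · exact Or.inr ((PySem.Set.mem_add c k x).2 (Or.inr he))
            have H2x : start ∈ PySem.Set.add done k :=
              (PySem.Set.mem_add done k start).2 (Or.inl H2)
            have H3x : ∀ x ∈ pvNbrs d k ++ rest, x ∈ pvRC d start := by
              intro x hx
              rcases List.mem_append.1 hx with h | h
              · exact pv_RC_trans hkRC (pv_RC_seed h)
              · exact H3 x (List.mem_cons_of_mem _ h)
            have Hfuelx : (pvNbrs d k ++ rest).length + pvW d (PySem.Set.add done k) < n := by
              have hwa := pvW_add (d := d) (done := done) (k := k) hk
              simp only [List.length_append]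
              simp only [List.length_cons] at Hfuel
              omega
            by_cases hnb : pvNbrs d k = []
            · rw [hLHS]
              simp only [List.foldl_cons]
              rw [hstep, hnb]
              simp only [List.foldl_nil, List.nil_append]
              exact ih rest (PySem.Set.add c k) (PySem.Set.add done k) H1x H2x
                (fun x hx => H3 x (List.mem_cons_of_mem _ hx))
                (by rw [hnb] at Hfuelx; simpa using Hfuelx)
            · have hkK : k ∈ pvKeys d := pv_key_of_nbrs hnb
              -- rewrite the inner fuel m to d.length = m+1
              have hcongr : ∀ (l : List String) (p : List String × PySem.Set String),
                  start ∈ p.2 → k ∈ p.2 →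
                  l.foldl (fun p key => pvGoM d m (PySem.Set.add p.1 key) p.2 key) p =
                  l.foldl (fun p key => pvGoM d d.length (PySem.Set.add p.1 key) p.2 key) p := by
                intro l
                induction l with
                | nil => intro p _ _; rfl
                | cons key tl ihl =>
                    intro p hsp hkp
                    have hmu : pvMu d key p.2 + 2 ≤ d.length :=
                      pvMu_lt_of_two (Ne.symm hkst) hsk hkK hsp hkp
                    have e1 : pvGoM d m (PySem.Set.add p.1 key) p.2 key =
                        pvGoM d d.length (PySem.Set.add p.1 key) p.2 key :=
                      pvGoM_fuel d m d.length (PySem.Set.add p.1 key) p.2 key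
                        (by omega) (by omega)
                    simp only [List.foldl_cons]
                    rw [e1]
                    exact ihl (pvGoM d d.length (PySem.Set.add p.1 key) p.2 key)
                      (pvGoM_done_mono d d.length _ _ key start hsp)
                      (pvGoM_done_mono d d.length _ _ key k hkp)
              have hks : k ∈ PySem.Set.add done k := (PySem.Set.mem_add done k k).2 (Or.inr rfl)
              rw [hLHS]
              simp only [List.foldl_cons]
              rw [hstep, hcongr (pvNbrs d k) (PySem.Set.add c k, PySem.Set.add done k) H2x hks,
                ← List.foldl_append]
              exact ih (pvNbrs d k ++ rest) (PySem.Set.add c k) (PySem.Set.add done k)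
                H1x H2x H3x Hfuelx

-- ===== VERDICT (by name: the statement is the Claim_ definition above) =====
theorem recursive_descent_spec : Claim_equal_recursive_descent := by
  unfold Claim_equal_recursive_descent
  intro d c s _ hpre
  unfold Spec_recursive_descent recursive_descent recursive_descent_alt
  by_cases hnb : pvNbrs d s = []
  · have hA : pvGoA d (d.length + 1) c s = c := by
      show (pvNbrs d s).foldl _ c = c
      rw [hnb]; rfl
    have hB : pvGoS d ((d.flatMap (fun p => p.2)).length + (d.flatMap (fun p => p.2)).length + 1)
        c (PySem.Set.add PySem.Set.empty s) (pvNbrs d s) = c := by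
      rw [hnb]; rfl
    rw [hA, hB]
  · have hsk : s ∈ pvKeys d := pv_key_of_nbrs hnb
    have hsr : s ∉ pvRC d s := hpre s List.mem_cons_self
    have hfuel : pvMu d s [] < d.length + 1 := by
      have h1 : pvMu d s [] ≤ (pvKeys d).toFinset.card := Finset.card_filter_le _ _
      have h2 : (pvKeys d).toFinset.card ≤ (pvKeys d).length := List.toFinset_card_le _
      have h3 : (pvKeys d).length = d.length := List.length_map ..
      omega
    have hmain := pvMain d (d.length + 1) c [] [] s
      (fun x hx => absurd hx List.not_mem_nil)
      (fun x hx => absurd hx List.not_mem_nil)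
      (fun y hy => hpre y (List.mem_cons.2 hy))
      hfuel
    have hM : pvGoM d (d.length + 1) c [] s =
        (pvNbrs d s).foldl (fun p key => pvGoM d d.length (PySem.Set.add p.1 key) p.2 key)
          (c, PySem.Set.add [] s) := by
      show (if s ∈ ([] : List String) then _ else _) = _
      rw [if_neg List.not_mem_nil]
    have hbr := pvBR d s hsk hsr
      ((d.flatMap (fun p => p.2)).length + (d.flatMap (fun p => p.2)).length + 1)
      (pvNbrs d s) c (PySem.Set.add [] s)
      (by
        intro x hx
        rcases (PySem.Set.mem_add [] s x).1 hx with h | rfl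
        · exact absurd h List.not_mem_nil
        · exact Or.inl rfl)
      ((PySem.Set.mem_add [] s s).2 (Or.inr rfl))
      (fun k hk => pv_RC_seed hk)
      (by
        have hwa := pvW_add (d := d) (done := ([] : List String)) (k := s) List.not_mem_nil
        have hwl : pvW d [] ≤ (d.flatMap (fun p => p.2)).length := pvW_le d []
        omega)
    have hempty : PySem.Set.add PySem.Set.empty s = PySem.Set.add [] s := rfl
    rw [hmain.1, hM, hempty, hbr]
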